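-- pv_equiv track=rewrite | github.com/tamirat-wubie/mullu-control-plane | mcoi/tools/audit_constraint_matrix.py | _render_per_adapter_table
-- ===== SOURCE A (Python) =====
-- from collections import defaultdict
--
-- VIOLATION_LEVELS = ("block", "escalate", "warn")
--
-- def _render_per_adapter_table(
--     adapter_name: str,
--     constraints: set[tuple[str, str]],
-- ) -> str:
--     if not constraints:
--         return f"_No constraints emitted for {adapter_name} under any probe._\n"
--     by_domain: dict[str, set[str]] = defaultdict(set)
--     for domain, response in constraints:
--         by_domain[domain].add(response)
--     lines = [
--         "| constraint_domain | block | escalate | warn |",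
--         "|---|:-:|:-:|:-:|",
--     ]
--     for domain in sorted(by_domain):
--         responses = by_domain[domain]
--         cells = " | ".join(
--             "✓" if level in responses else " " for level in VIOLATION_LEVELS
--         )
--         lines.append(f"| {domain} | {cells} |")
--     return "\n".join(lines) + "\n"
-- ===== SOURCE B (Python) =====
-- from collections import deque
--
-- VIOLATION_LEVELS = ("block", "escalate", "warn")
--
-- def _row_cells(d, pairs):
--     # pairs is a deque of lexicographically sorted (domain, response) pairs whose
--     # front run has domain d; consume it front-to-back, merging against the
--     # (alphabetically ordered) VIOLATION_LEVELS.
--     cells = []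
--     for level in VIOLATION_LEVELS:
--         while pairs and pairs[0][0] == d and pairs[0][1] < level:
--             pairs.popleft()
--         if pairs and pairs[0][0] == d and pairs[0][1] == level:
--             cells.append("✓")
--         else:
--             cells.append(" ")
--     return cells
--
-- def _rows(pairs):
--     rows = []
--     while pairs:
--         d = pairs[0][0]
--         cells = _row_cells(d, pairs)
--         while pairs and pairs[0][0] == d:
--             pairs.popleft()
--         rows.append(f"| {d} | {' | '.join(cells)} |")
--     return rows
--
-- def _render_per_adapter_table(
--     adapter_name: str,
--     constraints: set[tuple[str, str]],
-- ) -> str: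
--     if not constraints:
--         return f"_No constraints emitted for {adapter_name} under any probe._\n"
--     lines = [
--         "| constraint_domain | block | escalate | warn |",
--         "|---|:-:|:-:|:-:|",
--     ] + _rows(deque(sorted(constraints)))
--     return "\n".join(lines) + "\n"
-- ===== Notes on version B (the rewrite author's own statement) =====
-- stated objective: alternative
-- what changed: B sorts the constraint pairs lexicographically once and walks them in a single front-to-back pass (a deque), grouping consecutive runs of equal domains and filling each row's cells by a merge scan against the alphabetically ordered level tuple, instead of A's defaultdict-of-sets accumulation followed by sorting the keys and per-level set-membership tests.
import Mathlib
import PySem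

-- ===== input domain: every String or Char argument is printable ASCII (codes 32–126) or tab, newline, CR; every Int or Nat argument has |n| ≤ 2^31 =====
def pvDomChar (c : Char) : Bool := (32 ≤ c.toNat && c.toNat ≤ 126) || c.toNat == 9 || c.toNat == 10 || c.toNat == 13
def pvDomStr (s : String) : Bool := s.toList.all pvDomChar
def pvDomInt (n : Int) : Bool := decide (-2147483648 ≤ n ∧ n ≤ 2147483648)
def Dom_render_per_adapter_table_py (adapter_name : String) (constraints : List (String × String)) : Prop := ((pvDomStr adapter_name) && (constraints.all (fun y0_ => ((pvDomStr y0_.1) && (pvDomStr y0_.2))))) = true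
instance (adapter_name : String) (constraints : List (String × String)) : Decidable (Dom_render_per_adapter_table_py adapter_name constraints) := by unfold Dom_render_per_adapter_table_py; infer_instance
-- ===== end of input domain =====

-- B replaces A's defaultdict-of-sets accumulation + key sort + per-level set lookups by one
-- lexicographic sort of the pairs and a single front-to-back consuming pass that groups
-- consecutive equal-domain runs and fills cells by a merge scan against the ordered level
-- tuple (objective: alternative; same O(n log n) cost).
-- The Python A iterates over the (unmodelled) hash order of the input set only to build a
-- dict and a set, whose rendered output is order-independent, so the list-based ports are faithful.

-- ===== PORT A =====
def pvLevels : List String := ["block", "escalate", "warn"]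

def pvStepA (d : PySem.Dict String (PySem.Set String)) (p : String × String) :
    PySem.Dict String (PySem.Set String) :=
  d.insert p.1 (PySem.Set.add (d.getD p.1 PySem.Set.empty) p.2)

def render_per_adapter_table_py (adapter_name : String) (constraints : List (String × String)) : String :=
  if constraints.isEmpty then
    PySem.Str.join "" ["_No constraints emitted for ", adapter_name, " under any probe._\n"]
  else
    let byDomain := constraints.foldl pvStepA PySem.Dict.empty
    let lines : List String :=
      ["| constraint_domain | block | escalate | warn |", "|---|:-:|:-:|:-:|"] ++
      (PySem.List.sorted byDomain.keys (fun x => x) false).map (fun domain =>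
        let responses := byDomain.getD domain PySem.Set.empty
        let cells := PySem.Str.join " | "
          (pvLevels.map (fun level => if PySem.Set.contains responses level then "✓" else " "))
        PySem.Str.join "" ["| ", domain, " | ", cells, " |"])
    PySem.Str.join "" [PySem.Str.join "\n" lines, "\n"]

-- ===== PORT B =====
-- _row_cells's per-level body: pop pairs while their response sorts below `lv` within the
-- run of domain `d`, then mark "✓" iff the front pair is exactly (d, lv).
def pvCellStep (d : String) (st : List String × List (String × String)) (lv : String) :
    List String × List (String × String) :=
  let ps := st.2.dropWhile (fun p => p.1 == d && decide (p.2 < lv))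
  let mark := match ps.head? with
    | some p => if p.1 == d && p.2 == lv then "✓" else " "
    | none => " "
  (st.1 ++ [mark], ps)

def pvRowCells (d : String) (ps : List (String × String)) :
    List String × List (String × String) :=
  pvLevels.foldl (pvCellStep d) ([], ps)

-- the deque only ever shrinks (needed for termination of pvRowsB)
theorem pvCellStep_foldl_suffix (lvs : List String) (d : String)
    (acc : List String) (ps : List (String × String)) :
    (lvs.foldl (pvCellStep d) (acc, ps)).2 <:+ ps := by
  induction lvs generalizing acc ps with
  | nil => exact List.suffix_refl ps
  | cons lv rest ih =>
      exact (ih _ _).trans (List.dropWhile_suffix _)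

theorem pvRowsB_dec (p : String × String) (t : List (String × String)) :
    (((pvRowCells p.1 (p :: t)).2).dropWhile (fun q => q.1 == p.1)).length < (p :: t).length := by
  have h1 : (pvRowCells p.1 (p :: t)).2 <:+ (p :: t) := pvCellStep_foldl_suffix _ _ _ _
  have h2 : (((pvRowCells p.1 (p :: t)).2).dropWhile (fun q => q.1 == p.1)) <:+ (p :: t) :=
    (List.dropWhile_suffix _).trans h1
  have hle := h2.length_le
  rcases Nat.lt_or_ge (((pvRowCells p.1 (p :: t)).2).dropWhile (fun q => q.1 == p.1)).length
      (p :: t).length with h | h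
  · exact h
  · exfalso
    have heq := h2.eq_of_length (Nat.le_antisymm hle h)
    have hne : ¬ ((fun q : String × String => q.1 == p.1) p = true) := by
      have := List.head?_dropWhile_not (fun q : String × String => q.1 == p.1)
        ((pvRowCells p.1 (p :: t)).2)
      rw [heq] at this
      simp at this
    simp at hne

def pvRowsB (ps : List (String × String)) : List String :=
  match ps with
  | [] => []
  | p :: t =>
    let d := p.1
    let cells := (pvRowCells d (p :: t)).1
    let rest := ((pvRowCells d (p :: t)).2).dropWhile (fun q => q.1 == d)
    (PySem.Str.join "" ["| ", d, " | ", PySem.Str.join " | " cells, " |"]) :: pvRowsB rest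
termination_by ps.length
decreasing_by exact pvRowsB_dec p t

def render_per_adapter_table_py_alt (adapter_name : String) (constraints : List (String × String)) : String :=
  if constraints.isEmpty then
    PySem.Str.join "" ["_No constraints emitted for ", adapter_name, " under any probe._\n"]
  else
    let lines : List String :=
      ["| constraint_domain | block | escalate | warn |", "|---|:-:|:-:|:-:|"] ++
      pvRowsB (PySem.List.sorted2 constraints Prod.fst Prod.snd false)
    PySem.Str.join "" [PySem.Str.join "\n" lines, "\n"]

-- ===== PRECONDITION & SPEC =====
def Spec_render_per_adapter_table_py (adapter_name : String) (constraints : List (String × String)) (out : String) : Prop := out = render_per_adapter_table_py_alt adapter_name constraints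
instance (adapter_name : String) (constraints : List (String × String)) (out : String) : Decidable (Spec_render_per_adapter_table_py adapter_name constraints out) := by unfold Spec_render_per_adapter_table_py; infer_instance

-- ===== CLAIM (what is proved, stated in full; the proofs are below) =====
def Claim_equal_render_per_adapter_table_py : Prop := ∀ (adapter_name : String) (constraints : List (String × String)), Dom_render_per_adapter_table_py adapter_name constraints → Spec_render_per_adapter_table_py adapter_name constraints (render_per_adapter_table_py adapter_name constraints)

-- ===== LEMMAS AND PROOFS =====

-- canonical row string: membership of (d, level) in the constraint list decides each cell
def pvRowStr (cs : List (String × String)) (d : String) : String :=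
  PySem.Str.join "" ["| ", d, " | ",
    PySem.Str.join " | " (pvLevels.map (fun lv => if (d, lv) ∈ cs then "✓" else " ")), " |"]

-- lexicographic ≤ on pairs of strings
def pvR (a b : String × String) : Prop := a.1 < b.1 ∨ (a.1 = b.1 ∧ a.2 ≤ b.2)

-- ---------- A-side: fold-of-dict characterisation ----------
theorem pv_mem_fold (cs : List (String × String)) (d : PySem.Dict String (PySem.Set String))
    (domain level : String) :
    level ∈ ((cs.foldl pvStepA d).getD domain PySem.Set.empty)
      ↔ (domain, level) ∈ cs ∨ level ∈ d.getD domain PySem.Set.empty := by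
  induction cs generalizing d with
  | nil => simp
  | cons p rest ih =>
    simp only [List.foldl_cons, ih, List.mem_cons]
    rw [show (pvStepA d p).getD domain PySem.Set.empty
        = if domain = p.1 then PySem.Set.add (d.getD p.1 PySem.Set.empty) p.2
          else d.getD domain PySem.Set.empty from
      PySem.Dict.getD_insert d p.1 domain _ _]
    by_cases h : domain = p.1
    · subst h
      simp [PySem.Set.mem_add, Prod.ext_iff]
      tauto
    · simp [h, Prod.ext_iff]

theorem pv_keys_fold (cs : List (String × String)) :
    (cs.foldl pvStepA PySem.Dict.empty).keys = PySem.Set.ofList (cs.map Prod.fst) := by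
  have h := PySem.Dict.keys_foldl_insert_key (l := cs) (d := PySem.Dict.empty)
    (key := Prod.fst) (f := fun d p => PySem.Set.add (d.getD p.1 PySem.Set.empty) p.2)
  exact h

theorem pvA_rows (cs : List (String × String)) :
    (PySem.List.sorted (cs.foldl pvStepA PySem.Dict.empty).keys (fun x => x) false).map
      (fun domain =>
        let responses := (cs.foldl pvStepA PySem.Dict.empty).getD domain PySem.Set.empty
        let cells := PySem.Str.join " | "
          (pvLevels.map (fun level => if PySem.Set.contains responses level then "✓" else " "))
        PySem.Str.join "" ["| ", domain, " | ", cells, " |"])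
    = (PySem.List.sorted (PySem.Set.ofList (cs.map Prod.fst)) (fun x => x) false).map (pvRowStr cs) := by
  rw [pv_keys_fold]
  apply List.map_congr_left
  intro domain _
  unfold pvRowStr
  have hc : (pvLevels.map (fun level =>
        if PySem.Set.contains ((cs.foldl pvStepA PySem.Dict.empty).getD domain PySem.Set.empty) level
        then "✓" else " "))
      = (pvLevels.map (fun lv => if (domain, lv) ∈ cs then "✓" else " ")) := by
    apply List.map_congr_left
    intro level _
    have : PySem.Set.contains ((cs.foldl pvStepA PySem.Dict.empty).getD domain PySem.Set.empty) level
        = decide ((domain, level) ∈ cs) := by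
      rw [Bool.eq_iff_iff, PySem.Set.contains_iff, pv_mem_fold]
      simp
    simp only [this, decide_eq_true_eq]
  simp only [hc]

-- ---------- B-side: the sorted pair list is Pairwise pvR ----------
theorem pvR_trans {a b c : String × String} (h1 : pvR a b) (h2 : pvR b c) : pvR a c := by
  rcases h1 with h1 | ⟨h1, h1'⟩ <;> rcases h2 with h2 | ⟨h2, h2'⟩
  · exact Or.inl (h1.trans h2)
  · exact Or.inl (h2 ▸ h1)
  · exact Or.inl (h1 ▸ h2)
  · exact Or.inr ⟨h1.trans h2, h1'.trans h2'⟩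

def pvBefore (a b : String × String) : Bool :=
  decide (a.1 < b.1) || (!decide (b.1 < a.1) && decide (a.2 < b.2))

theorem pvBefore_imp {a b : String × String} (h : pvBefore a b = true) : pvR a b := by
  unfold pvBefore at h
  simp only [Bool.or_eq_true, Bool.and_eq_true, Bool.not_eq_true', decide_eq_true_eq,
    decide_eq_false_iff_not] at h
  rcases h with h | ⟨h1, h2⟩
  · exact Or.inl h
  · rcases lt_trichotomy a.1 b.1 with h' | h' | h'
    · exact Or.inl h'
    · exact Or.inr ⟨h', le_of_lt h2⟩
    · exact absurd h' h1
theorem pvNotBefore_imp {a b : String × String} (h : ¬ pvBefore a b = true) : pvR b a := by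
  unfold pvBefore at h
  simp only [Bool.or_eq_true, Bool.and_eq_true, Bool.not_eq_true', decide_eq_true_eq,
    decide_eq_false_iff_not, not_or, not_and] at h
  obtain ⟨h1, h2⟩ := h
  rcases lt_trichotomy b.1 a.1 with h' | h' | h'
  · exact Or.inl h'
  · exact Or.inr ⟨h', not_lt.mp (h2 (by simp [h']))⟩
  · exact absurd h' h1

theorem pv_insertBy_pairwise (x : String × String) (ys : List (String × String))
    (h : ys.Pairwise pvR) : (PySem.List.insertBy pvBefore x ys).Pairwise pvR := by
  induction ys with
  | nil => simp [PySem.List.insertBy]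
  | cons y t ih =>
    rw [List.pairwise_cons] at h
    obtain ⟨hy, ht⟩ := h
    unfold PySem.List.insertBy
    by_cases hb : pvBefore x y = true
    · rw [if_pos hb]
      refine List.Pairwise.cons ?_ (List.Pairwise.cons hy ht)
      intro z hz
      rcases List.mem_cons.mp hz with rfl | hz
      · exact pvBefore_imp hb
      · exact pvR_trans (pvBefore_imp hb) (hy z hz)
    · rw [if_neg hb]
      refine List.Pairwise.cons ?_ (ih ht)
      intro z hz
      rcases (PySem.List.insertBy_mem_iff pvBefore x z t).mp hz with rfl | hz
      · exact pvNotBefore_imp hb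
      · exact hy z hz

theorem pv_sorted2_pairwise (cs : List (String × String)) :
    (PySem.List.sorted2 cs Prod.fst Prod.snd false).Pairwise pvR := by
  show (cs.foldl (fun acc x => PySem.List.insertBy _ x acc) []).Pairwise pvR
  have : ∀ (l : List (String × String)) (acc : List (String × String)),
      acc.Pairwise pvR →
      (l.foldl (fun acc x => PySem.List.insertBy
        (fun a b => decide (a.1 < b.1) || (!decide (b.1 < a.1) && decide (a.2 < b.2))) x acc)
        acc).Pairwise pvR := by
    intro l
    induction l with
    | nil => intro acc h; exact h
    | cons x t ih =>
      intro acc h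
      exact ih _ (pv_insertBy_pairwise x acc h)
  exact this cs [] (List.Pairwise.nil)

-- ---------- generic dropWhile facts specialised to our predicates ----------
theorem pv_dropWhile_dropWhile {α : Type} (q r : α → Bool) (himp : ∀ x, q x = true → r x = true)
    (l : List α) : (l.dropWhile q).dropWhile r = l.dropWhile r := by
  induction l with
  | nil => rfl
  | cons x t ih =>
    by_cases hq : q x = true
    · rw [List.dropWhile_cons, if_pos hq, ih, List.dropWhile_cons, if_pos (himp x hq)]
    · rw [List.dropWhile_cons, if_neg hq]

theorem pv_mem_dropWhile {α : Type} [DecidableEq α] (q : α → Bool) (x : α)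
    (hx : q x = false) (l : List α) : x ∈ l.dropWhile q ↔ x ∈ l := by
  induction l with
  | nil => simp
  | cons y t ih =>
    by_cases hq : q y = true
    · rw [List.dropWhile_cons, if_pos hq, ih, List.mem_cons]
      constructor
      · exact Or.inr
      · rintro (rfl | h)
        · rw [hq] at hx; exact absurd hx (by simp)
        · exact h
    · rw [List.dropWhile_cons, if_neg hq]

-- the per-level mark of the merge scan is exactly membership of (d, lv)
theorem pv_mark (d lv : String) (ps : List (String × String))
    (hp : ps.Pairwise pvR) (hlow : ∀ q ∈ ps, d ≤ q.1) :
    (match (ps.dropWhile (fun p => p.1 == d && decide (p.2 < lv))).head? with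
      | some p => if p.1 == d && p.2 == lv then "✓" else " "
      | none => " ")
    = (if (d, lv) ∈ ps then "✓" else " ") := by
  induction ps with
  | nil => simp
  | cons q t ih =>
    rw [List.pairwise_cons] at hp
    obtain ⟨hq, ht⟩ := hp
    by_cases hc : ((fun p : String × String => p.1 == d && decide (p.2 < lv)) q) = true
    · rw [List.dropWhile_cons, if_pos hc]
      simp only [beq_iff_eq, Bool.and_eq_true, decide_eq_true_eq] at hc
      have hne : (d, lv) ≠ q := by
        intro h; rw [← h] at hc; exact absurd hc.2 (lt_irrefl lv)
      rw [ih ht (fun x hx => hlow x (List.mem_cons_of_mem q hx))]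
      have hiff : ((d, lv) ∈ t) ↔ ((d, lv) ∈ q :: t) := by
        rw [List.mem_cons]
        exact ⟨Or.inr, fun h => h.resolve_left hne⟩
      exact if_congr hiff rfl rfl
    · rw [List.dropWhile_cons, if_neg hc]
      simp only [List.head?_cons]
      simp only [beq_iff_eq, Bool.and_eq_true, decide_eq_true_eq, not_and] at hc
      by_cases he : q.1 = d ∧ q.2 = lv
      · have : q = (d, lv) := Prod.ext he.1 he.2
        simp [this]
      · have hq' : ¬ (q.1 == d && q.2 == lv) = true := by
          simp only [beq_iff_eq, Bool.and_eq_true]; exact he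
        rw [if_neg hq']
        have hnotmem : (d, lv) ∉ q :: t := by
          intro hm
          rcases List.mem_cons.mp hm with h | h
          · apply he; rw [← h]; exact ⟨rfl, rfl⟩
          · -- (d,lv) ∈ t; use order
            by_cases hq1 : q.1 = d
            · have hlt : lv < q.2 := by
                rcases lt_trichotomy q.2 lv with h' | h' | h'
                · exact absurd h' (hc hq1)
                · exact absurd ⟨hq1, h'⟩ he
                · exact h'
              have := hq _ h
              rcases this with h' | ⟨h', h''⟩
              · simp only [hq1] at h'; exact absurd h' (lt_irrefl d)
              · simp only at h''
                exact absurd (lt_of_lt_of_le hlt h'') (lt_irrefl lv)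
            · have hdlt : d < q.1 := lt_of_le_of_ne (hlow q (List.mem_cons_self ..)) (Ne.symm hq1)
              have := hq _ h
              rcases this with h' | ⟨h', _⟩
              · simp only at h'
                exact absurd (hdlt.trans h') (lt_irrefl d)
              · simp only at h'
                exact hq1 h'
        rw [if_neg hnotmem]

-- membership of (d, lv') survives the earlier-level drops (lv ≤ lv')
theorem pv_mem_drop_level (d lv lv' : String) (hlv : lv ≤ lv') (ps : List (String × String)) :
    (d, lv') ∈ ps.dropWhile (fun p => p.1 == d && decide (p.2 < lv)) ↔ (d, lv') ∈ ps := by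
  apply pv_mem_dropWhile
  simp only [Bool.and_eq_false_iff]
  right
  simp only [decide_eq_false_iff_not, not_lt]
  exact hlv

-- after a run of domain d is consumed, everything left has a strictly larger domain
theorem pv_rest_gt (d : String) (ps : List (String × String))
    (hp : ps.Pairwise pvR) (hlow : ∀ q ∈ ps, d ≤ q.1) :
    ∀ q ∈ ps.dropWhile (fun p => p.1 == d), d < q.1 := by
  induction ps with
  | nil => simp
  | cons x t ih =>
    rw [List.pairwise_cons] at hp
    obtain ⟨hx, ht⟩ := hp
    by_cases hc : ((fun p : String × String => p.1 == d) x) = true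
    · rw [List.dropWhile_cons, if_pos hc]
      exact ih ht (fun q hq => hlow q (List.mem_cons_of_mem x hq))
    · rw [List.dropWhile_cons, if_neg hc]
      simp only [beq_iff_eq] at hc
      have hdx : d < x.1 := lt_of_le_of_ne (hlow x (List.mem_cons_self ..)) (Ne.symm hc)
      intro q hq
      rcases List.mem_cons.mp hq with rfl | hq
      · exact hdx
      · rcases hx q hq with h | ⟨h, _⟩
        · exact hdx.trans h
        · exact h ▸ hdx

-- dropping the d-run does not change membership of pairs with another domain
theorem pv_mem_rest (d : String) (ps : List (String × String)) (x : String × String)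
    (hx : x.1 ≠ d) : x ∈ ps.dropWhile (fun p => p.1 == d) ↔ x ∈ ps := by
  apply pv_mem_dropWhile
  simp only [beq_eq_false_iff_ne, ne_eq]
  exact hx

-- the sorted distinct-domain list of a sorted pair list decomposes run by run
theorem pv_domains_cons (p : String × String) (t : List (String × String))
    (hp : (p :: t).Pairwise pvR) :
    PySem.List.sorted (PySem.Set.ofList ((p :: t).map Prod.fst)) (fun x => x) false
      = p.1 :: PySem.List.sorted
          (PySem.Set.ofList (((p :: t).dropWhile (fun q => q.1 == p.1)).map Prod.fst))
          (fun x => x) false := by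
  have hlow : ∀ q ∈ p :: t, p.1 ≤ q.1 := by
    intro q hq
    rcases List.mem_cons.mp hq with rfl | hq
    · exact le_refl _
    · rcases (List.pairwise_cons.mp hp).1 q hq with h | ⟨h, _⟩
      · exact le_of_lt h
      · exact le_of_eq h
  have hgt := pv_rest_gt p.1 (p :: t) hp hlow
  set rest := (p :: t).dropWhile (fun q => q.1 == p.1) with hrest
  apply PySem.List.sorted_eq_of_perm_of_pairwise_lt
  · -- permutation
    have hn1 : (p.1 :: PySem.List.sorted (PySem.Set.ofList (rest.map Prod.fst)) (fun x => x) false).Nodup := by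
      refine List.nodup_cons.mpr ⟨?_, ?_⟩
      · intro hm
        rw [PySem.List.mem_sorted, PySem.Set.mem_ofList, List.mem_map] at hm
        obtain ⟨q, hq, hq1⟩ := hm
        exact absurd (hq1 ▸ hgt q hq) (lt_irrefl p.1)
      · exact (PySem.List.sorted_ofList_pairwise_lt _).imp (fun h => ne_of_lt h)
    have hn2 : (PySem.Set.ofList ((p :: t).map Prod.fst) : List String).Nodup :=
      PySem.Set.nodup_ofList _
    rw [List.perm_ext_iff_of_nodup hn1 hn2]
    intro a
    rw [List.mem_cons, PySem.List.mem_sorted, PySem.Set.mem_ofList, PySem.Set.mem_ofList]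
    constructor
    · rintro (rfl | hm)
      · exact List.mem_map_of_mem (List.mem_cons_self ..)
      · obtain ⟨q, hq, rfl⟩ := List.mem_map.mp hm
        exact List.mem_map_of_mem ((List.dropWhile_suffix _).subset hq)
    · intro hm
      obtain ⟨q, hq, rfl⟩ := List.mem_map.mp hm
      by_cases hqd : q.1 = p.1
      · exact Or.inl hqd
      · refine Or.inr (List.mem_map_of_mem ?_)
        exact (pv_mem_rest p.1 (p :: t) q hqd).mpr hq
  · -- strictly increasing
    refine List.pairwise_cons.mpr ⟨?_, PySem.List.sorted_ofList_pairwise_lt _⟩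
    intro a ha
    rw [PySem.List.mem_sorted, PySem.Set.mem_ofList, List.mem_map] at ha
    obtain ⟨q, hq, rfl⟩ := ha
    exact hgt q hq

-- main B-side characterisation: on a lexicographically sorted pair list, the consuming
-- grouping pass renders exactly one canonical row per distinct domain, in sorted order
set_option maxHeartbeats 1000000 in
theorem pvRowsB_spec (ps : List (String × String)) (hp : ps.Pairwise pvR) :
    pvRowsB ps
      = (PySem.List.sorted (PySem.Set.ofList (ps.map Prod.fst)) (fun x => x) false).map
          (pvRowStr ps) := by
  induction hn : ps.length using Nat.strong_induction_on generalizing ps with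
  | _ n ih =>
    match ps, hp with
    | [], _ => simp [pvRowsB, PySem.Set.ofList, PySem.List.sorted]
    | p :: t, hp =>
      have hlow : ∀ q ∈ p :: t, p.1 ≤ q.1 := by
        intro q hq
        rcases List.mem_cons.mp hq with rfl | hq
        · exact le_refl _
        · rcases (List.pairwise_cons.mp hp).1 q hq with h | ⟨h, _⟩
          · exact le_of_lt h
          · exact le_of_eq h
      -- the three cell marks
      have hb : ("block" : String) ≤ "escalate" :=
        le_of_lt (by rw [String.lt_iff_toList_lt]; decide)
      have he : ("escalate" : String) ≤ "warn" :=
        le_of_lt (by rw [String.lt_iff_toList_lt]; decide)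
      have hps1 : ∀ (lv : String), ((p :: t).dropWhile
          (fun q => q.1 == p.1 && decide (q.2 < lv))).Pairwise pvR ∧
          (∀ q ∈ (p :: t).dropWhile (fun q => q.1 == p.1 && decide (q.2 < lv)), p.1 ≤ q.1) := by
        intro lv
        constructor
        · exact hp.sublist (List.dropWhile_suffix _).sublist
        · intro q hq; exact hlow q ((List.dropWhile_suffix _).subset hq)
      -- unfold the fold over the three concrete levels
      have hcells : (pvRowCells p.1 (p :: t)).1
            = pvLevels.map (fun lv => if (p.1, lv) ∈ p :: t then "✓" else " ")
          ∧ (pvRowCells p.1 (p :: t)).2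
            = (((p :: t).dropWhile (fun q => q.1 == p.1 && decide (q.2 < "block"))).dropWhile
                (fun q => q.1 == p.1 && decide (q.2 < "escalate"))).dropWhile
                (fun q => q.1 == p.1 && decide (q.2 < "warn")) := by
        unfold pvRowCells pvLevels
        simp only [List.foldl_cons, List.foldl_nil]
        unfold pvCellStep
        simp only [List.nil_append, List.cons_append]
        constructor
        · simp only [List.map_cons, List.map_nil]
          -- reduce the three marks
          have m1 := pv_mark p.1 "block" (p :: t) hp hlow
          have hset1 := hps1 "block"
          have m2' := pv_mark p.1 "escalate" _ hset1.1 hset1.2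
          have m2 : (match (((p :: t).dropWhile (fun q => q.1 == p.1 && decide (q.2 < "block"))).dropWhile
                (fun q => q.1 == p.1 && decide (q.2 < "escalate"))).head? with
              | some q => if q.1 == p.1 && q.2 == "escalate" then "✓" else " "
              | none => " ") = (if (p.1, "escalate") ∈ p :: t then "✓" else " ") :=
            m2'.trans (if_congr (pv_mem_drop_level p.1 "block" "escalate" hb (p :: t)) rfl rfl)
          have hd2 : (((p :: t).dropWhile (fun q => q.1 == p.1 && decide (q.2 < "block"))).dropWhile
              (fun q => q.1 == p.1 && decide (q.2 < "escalate"))).Pairwise pvR :=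
            (hps1 "block").1.sublist (List.dropWhile_suffix _).sublist
          have hd2' : ∀ q ∈ ((p :: t).dropWhile (fun q => q.1 == p.1 && decide (q.2 < "block"))).dropWhile
              (fun q => q.1 == p.1 && decide (q.2 < "escalate")), p.1 ≤ q.1 := by
            intro q hq
            exact (hps1 "block").2 q ((List.dropWhile_suffix _).subset hq)
          have m3' := pv_mark p.1 "warn" _ hd2 hd2'
          have m3 : (match ((((p :: t).dropWhile (fun q => q.1 == p.1 && decide (q.2 < "block"))).dropWhile
                (fun q => q.1 == p.1 && decide (q.2 < "escalate"))).dropWhile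
                (fun q => q.1 == p.1 && decide (q.2 < "warn"))).head? with
              | some q => if q.1 == p.1 && q.2 == "warn" then "✓" else " "
              | none => " ") = (if (p.1, "warn") ∈ p :: t then "✓" else " ") :=
            m3'.trans (if_congr ((pv_mem_drop_level p.1 "escalate" "warn" he _).trans
                (pv_mem_drop_level p.1 "block" "warn" (hb.trans he) (p :: t))) rfl rfl)
          rw [m1, m2, m3]
        · trivial
      -- rest = drop the whole d-run
      have himp1 : ∀ x : String × String,
          (x.1 == p.1 && decide (x.2 < "block")) = true → (x.1 == p.1) = true := by
        intro x hx; exact (Bool.and_eq_true .. ▸ hx).1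
      have himp2 : ∀ x : String × String,
          (x.1 == p.1 && decide (x.2 < "escalate")) = true → (x.1 == p.1) = true := by
        intro x hx; exact (Bool.and_eq_true .. ▸ hx).1
      have himp3 : ∀ x : String × String,
          (x.1 == p.1 && decide (x.2 < "warn")) = true → (x.1 == p.1) = true := by
        intro x hx; exact (Bool.and_eq_true .. ▸ hx).1
      have hrest : ((pvRowCells p.1 (p :: t)).2).dropWhile (fun q => q.1 == p.1)
          = (p :: t).dropWhile (fun q => q.1 == p.1) := by
        rw [hcells.2, pv_dropWhile_dropWhile _ _ himp3, pv_dropWhile_dropWhile _ _ himp2,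
            pv_dropWhile_dropWhile _ _ himp1]
      -- termination measure for IH
      have hlen : ((p :: t).dropWhile (fun q => q.1 == p.1)).length < n := by
        rw [← hn, ← hrest]
        exact pvRowsB_dec p t
      have hprest : ((p :: t).dropWhile (fun q => q.1 == p.1)).Pairwise pvR :=
        hp.sublist (List.dropWhile_suffix _).sublist
      have hih := ih _ hlen _ hprest rfl
      have hgt := pv_rest_gt p.1 (p :: t) hp hlow
      -- assemble
      have hunfold : pvRowsB (p :: t)
          = (PySem.Str.join "" ["| ", p.1, " | ",
              PySem.Str.join " | " (pvRowCells p.1 (p :: t)).1, " |"])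
            :: pvRowsB (((pvRowCells p.1 (p :: t)).2).dropWhile (fun q => q.1 == p.1)) := by
        rw [pvRowsB]
      rw [hunfold]
      rw [hrest]
      rw [hih]
      rw [pv_domains_cons p t hp]
      rw [List.map_cons]
      congr 1
      · -- the head row
        unfold pvRowStr
        rw [hcells.1]
      · -- the remaining rows: transport membership from rest to p :: t
        apply List.map_congr_left
        intro d hd
        rw [PySem.List.mem_sorted, PySem.Set.mem_ofList, List.mem_map] at hd
        obtain ⟨q, hq, rfl⟩ := hd
        have hne : q.1 ≠ p.1 := ne_of_gt (hgt q hq)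
        unfold pvRowStr
        have hmap : pvLevels.map (fun lv =>
              if (q.1, lv) ∈ (p :: t).dropWhile (fun r => r.1 == p.1) then "✓" else " ")
            = pvLevels.map (fun lv => if (q.1, lv) ∈ p :: t then "✓" else " ") :=
          List.map_congr_left (fun lv _ =>
            if_congr (pv_mem_rest p.1 (p :: t) (q.1, lv) hne) rfl rfl)
        rw [hmap]

-- transport the canonical form along a permutation of the constraint list
theorem pv_canonical_perm (xs ys : List (String × String)) (h : xs.Perm ys) :
    (PySem.List.sorted (PySem.Set.ofList (xs.map Prod.fst)) (fun x => x) false).map (pvRowStr xs)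
      = (PySem.List.sorted (PySem.Set.ofList (ys.map Prod.fst)) (fun x => x) false).map (pvRowStr ys) := by
  have hdom : PySem.List.sorted (PySem.Set.ofList (xs.map Prod.fst)) (fun x => x) false
      = PySem.List.sorted (PySem.Set.ofList (ys.map Prod.fst)) (fun x => x) false := by
    apply PySem.List.eq_of_perm_of_pairwise_le_of_pairwise_lt (fun x => x)
    · have h1 : (PySem.List.sorted (PySem.Set.ofList (xs.map Prod.fst)) (fun x => x) false).Nodup :=
        (PySem.List.sorted_ofList_pairwise_lt _).imp (fun h => ne_of_lt h)
      have h2 : (PySem.List.sorted (PySem.Set.ofList (ys.map Prod.fst)) (fun x => x) false).Nodup :=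
        (PySem.List.sorted_ofList_pairwise_lt _).imp (fun h => ne_of_lt h)
      rw [List.perm_ext_iff_of_nodup h1 h2]
      intro a
      rw [PySem.List.mem_sorted, PySem.List.mem_sorted, PySem.Set.mem_ofList, PySem.Set.mem_ofList]
      exact (h.map Prod.fst).mem_iff
    · exact (PySem.List.sorted_ofList_pairwise_lt _).imp le_of_lt
    · exact PySem.List.sorted_ofList_pairwise_lt _
  rw [hdom]
  apply List.map_congr_left
  intro d _
  unfold pvRowStr
  have hmap : pvLevels.map (fun lv => if (d, lv) ∈ xs then "✓" else " ")
      = pvLevels.map (fun lv => if (d, lv) ∈ ys then "✓" else " ") :=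
    List.map_congr_left (fun lv _ => if_congr h.mem_iff rfl rfl)
  rw [hmap]

-- ===== VERDICT (by name: the statement is the Claim_ definition above) =====
theorem render_per_adapter_table_py_spec : Claim_equal_render_per_adapter_table_py := by
  intro adapter_name constraints _
  unfold Spec_render_per_adapter_table_py render_per_adapter_table_py render_per_adapter_table_py_alt
  by_cases h : constraints.isEmpty = true
  · rw [if_pos h, if_pos h]
  · rw [if_neg h, if_neg h]
    simp only []
    rw [pvRowsB_spec _ (pv_sorted2_pairwise constraints), pvA_rows,
        pv_canonical_perm constraints (PySem.List.sorted2 constraints Prod.fst Prod.snd false)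
          (PySem.List.sorted2_perm constraints Prod.fst Prod.snd false).symm]
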